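-- pv_equiv track=rewrite | github.com/anr-private/microcontrollers | pi_pico/projects/watering_controller/py/lib/utils.py | show_cc
-- ===== SOURCE A (Python) =====
-- def show_cc(line):
--     """ convert line to a new line, replacing all control chars with visible rep """
--     if line is None: line = ""
--     chars = []
--     for ch in line:
--         if ch == "\r":
--             chars.append("\\r")
--         elif ch == "\n":
--             chars.append("\\n")
--         elif ch == "\t":
--             chars.append("\\t")
--         else:
--             chars.append(ch)
--     return "".join(chars)
-- ===== SOURCE B (Python) =====
-- def show_cc(line):
--     """ convert line to a new line, replacing all control chars with visible rep """
--     if line is None: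
--         line = ""
--     return line.replace("\r", "\\r").replace("\n", "\\n").replace("\t", "\\t")
-- ===== Notes on version B (the rewrite author's own statement) =====
-- stated objective: simpler
-- what changed: Replaces the fused per-character loop that appends escape tokens to a list and joins them with three successive whole-string str.replace passes (safe because the substituted texts are never matched by later passes).
import Mathlib
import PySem

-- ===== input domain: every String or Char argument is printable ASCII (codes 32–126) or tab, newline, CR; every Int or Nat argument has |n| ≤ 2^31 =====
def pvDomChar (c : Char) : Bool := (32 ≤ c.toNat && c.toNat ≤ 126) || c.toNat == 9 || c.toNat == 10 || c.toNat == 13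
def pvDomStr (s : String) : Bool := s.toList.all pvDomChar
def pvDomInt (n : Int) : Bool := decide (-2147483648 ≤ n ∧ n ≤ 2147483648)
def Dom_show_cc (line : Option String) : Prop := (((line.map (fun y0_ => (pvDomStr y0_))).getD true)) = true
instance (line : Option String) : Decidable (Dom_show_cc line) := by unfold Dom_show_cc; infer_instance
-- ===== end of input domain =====

-- B replaces A's fused per-character loop with three chained whole-string replace passes; objective: simpler.

-- ===== PORT A =====
-- the per-character loop: each char is mapped to its escape token, tokens are collected and joined
def show_cc (line : Option String) : String :=
  let line := match line with | none => "" | some s => s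
  let chars : List String := line.toList.foldl (fun acc ch =>
    if ch = '\r' then acc ++ ["\\r"]
    else if ch = '\n' then acc ++ ["\\n"]
    else if ch = '\t' then acc ++ ["\\t"]
    else acc ++ [String.ofList [ch]]) []
  PySem.Str.join "" chars

-- ===== PORT B =====
def show_cc_alt (line : Option String) : String :=
  let line := match line with | none => "" | some s => s
  PySem.Str.replace (PySem.Str.replace (PySem.Str.replace line "\r" "\\r") "\n" "\\n") "\t" "\\t"

-- ===== PRECONDITION & SPEC =====
def Spec_show_cc (line : Option String) (out : String) : Prop := out = show_cc_alt line
instance (line : Option String) (out : String) : Decidable (Spec_show_cc line out) := by unfold Spec_show_cc; infer_instance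

-- ===== CLAIM (what is proved, stated in full; the proofs are below) =====
def Claim_equal_show_cc : Prop := ∀ (line : Option String), Dom_show_cc line → Spec_show_cc line (show_cc line)

-- ===== LEMMAS AND PROOFS =====

-- replace with a single-character pattern is a flatMap over the characters
lemma replace_go_single (o : Char) (new : List Char) :
    ∀ (s : List Char) (fuel : Nat) (acc : List Char), s.length ≤ fuel →
      PySem.Chars.replace.go [o] new fuel s acc
        = acc.reverse ++ s.flatMap (fun c => if c = o then new else [c]) := by
  intro s
  induction s with
  | nil =>
    intro fuel acc _
    cases fuel <;> simp [PySem.Chars.replace.go]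
  | cons c t ih =>
    intro fuel acc h
    cases fuel with
    | zero => simp at h
    | succ fuel =>
      rw [PySem.Chars.replace.go]
      by_cases hc : c = o
      · subst hc
        have : List.isPrefixOf [c] (c :: t) = true := by simp [List.isPrefixOf]
        rw [if_pos this]
        simp only [List.length_cons] at h
        simp only [List.length_cons, List.length_nil, List.drop_succ_cons, List.drop_zero]
        rw [ih fuel (new.reverse ++ acc) (by omega)]
        simp
      · have : List.isPrefixOf [o] (c :: t) = false := by
          simp [List.isPrefixOf]
          intro h'; exact absurd h'.symm hc
        rw [if_neg (by simp [this])]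
        simp only [List.length_cons] at h
        rw [ih fuel (c :: acc) (by omega)]
        simp [hc]

lemma replace_single (s : List Char) (o : Char) (new : List Char) :
    PySem.Chars.replace s [o] new = s.flatMap (fun c => if c = o then new else [c]) := by
  rw [PySem.Chars.replace]
  simp only [List.isEmpty_cons, if_false, Bool.false_eq_true]
  simpa using replace_go_single o new s s.length [] le_rfl

-- the escape map of A, on characters
def escTok (c : Char) : List Char :=
  if c = '\r' then ['\\', 'r']
  else if c = '\n' then ['\\', 'n']
  else if c = '\t' then ['\\', 't'] else [c]

lemma intercalate_nil_flatten : ∀ (l : List (List Char)), List.intercalate [] l = l.flatten := by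
  intro l
  induction l with
  | nil => rfl
  | cons a t ih =>
    cases t with
    | nil => simp [List.intercalate]
    | cons b u => simp_all [List.intercalate, List.intersperse]

lemma foldl_tokens (g : Char → String) :
    ∀ (l : List Char) (acc : List String),
      l.foldl (fun acc ch => acc ++ [g ch]) acc = acc ++ l.map g := by
  intro l
  induction l with
  | nil => simp
  | cons c t ih => intro acc; simp [ih]

lemma show_cc_core (s : String) :
    (PySem.Str.join "" (s.toList.foldl (fun acc ch =>
      if ch = '\r' then acc ++ ["\\r"]
      else if ch = '\n' then acc ++ ["\\n"]
      else if ch = '\t' then acc ++ ["\\t"]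
      else acc ++ [String.ofList [ch]]) [])).toList = s.toList.flatMap escTok := by
  have hfun : (fun (acc : List String) ch =>
      if ch = '\r' then acc ++ ["\\r"]
      else if ch = '\n' then acc ++ ["\\n"]
      else if ch = '\t' then acc ++ ["\\t"]
      else acc ++ [String.ofList [ch]])
      = (fun (acc : List String) ch => acc ++ [(fun ch =>
        if ch = '\r' then "\\r" else if ch = '\n' then "\\n"
        else if ch = '\t' then "\\t" else String.ofList [ch]) ch]) := by
    funext acc ch; split_ifs <;> simp_all
  rw [hfun, foldl_tokens]
  simp only [PySem.Str.join, PySem.Chars.join, List.nil_append, String.toList_ofList]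
  rw [show ("" : String).toList = [] from rfl, intercalate_nil_flatten, List.map_map, List.flatMap]
  congr 1
  apply List.map_congr_left
  intro c _
  simp only [Function.comp, escTok]
  split_ifs <;> simp_all

lemma show_cc_toList (line : Option String) :
    (show_cc line).toList = ((match line with | none => "" | some s => s) : String).toList.flatMap escTok := by
  cases line <;> exact show_cc_core _

lemma show_cc_alt_toList (line : Option String) :
    (show_cc_alt line).toList = ((match line with | none => "" | some s => s) : String).toList.flatMap escTok := by
  cases line <;>
  · simp only [show_cc_alt, PySem.Str.toList_replace]
    rw [show ("\r" : String).toList = ['\r'] from rfl, show ("\n" : String).toList = ['\n'] from rfl,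
        show ("\t" : String).toList = ['\t'] from rfl,
        show ("\\r" : String).toList = ['\\', 'r'] from rfl,
        show ("\\n" : String).toList = ['\\', 'n'] from rfl,
        show ("\\t" : String).toList = ['\\', 't'] from rfl]
    rw [replace_single, replace_single, replace_single, List.flatMap_assoc, List.flatMap_assoc]
    congr 1
    funext c
    simp only [escTok]
    by_cases h1 : c = '\r'
    · subst h1; decide
    · by_cases h2 : c = '\n'
      · subst h2; decide
      · by_cases h3 : c = '\t'
        · subst h3; decide
        · simp [h1, h2, h3]

-- ===== VERDICT (by name: the statement is the Claim_ definition above) =====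
theorem show_cc_spec : Claim_equal_show_cc := by
  intro line _
  unfold Spec_show_cc
  apply String.toList_inj.mp
  rw [show_cc_toList, show_cc_alt_toList]
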